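-- pv_equiv track=rewrite | github.com/lupusruber/AI2023 | lab1_2023/Snake_Changed.py | move_snake
-- ===== SOURCE A (Python) =====
-- def move_snake_head(movement, snake_head, direction):
--     x, y = snake_head
--     new_direction = direction
--     south, east, west, north = 'SOUTH', 'EAST', 'WEST', 'NORTH'
--
--     if movement == 'ProdolzhiPravo':
--         if direction == south:
--             y -= 1
--             new_direction = south
--         elif direction == north:
--             y += 1
--             new_direction = north
--         elif direction == east:
--             x += 1
--             new_direction = east
--         elif direction == west:
--             x -= 1
--             new_direction = west
--     elif movement == 'SvrtiDesno':
--         if direction == south: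
--             x -= 1
--             new_direction = west
--         elif direction == north:
--             x += 1
--             new_direction = east
--         elif direction == east:
--             y -= 1
--             new_direction = south
--         elif direction == west:
--             y += 1
--             new_direction = north
--     elif movement == 'SvrtiLevo':
--         if direction == south:
--             x += 1
--             new_direction = east
--         elif direction == north:
--             x -= 1
--             new_direction = west
--         elif direction == east:
--             y += 1
--             new_direction = north
--         elif direction == west:
--             y -= 1
--             new_direction = south
--
--     return (x, y), new_direction
--
-- def move_snake(movement, snake, apples, direction):
--     casted_snake_position = list(snake)
--     casted_apples = list(apples)
--
--     new_snake_position_list = []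
--
--     current_snake_head = casted_snake_position[0]
--     new_snake_head, new_direction = move_snake_head(movement=movement, snake_head=current_snake_head,
--                                                     direction=direction)
--     new_snake_position_list.append(new_snake_head)
--     new_snake_position_list.extend(casted_snake_position[1:])
--
--     new_apple_list = [apple for apple in casted_apples if apple != new_snake_head]
--     if new_snake_head in casted_apples:
--         old_snake_tail = casted_snake_position[-1]
--         new_snake_position_list.append(old_snake_tail)
--
--     return tuple(new_snake_position_list), tuple(new_apple_list), new_direction
-- ===== SOURCE B (Python) =====
-- # Rotation-ring re-implementation: directions live on a counterclockwise ring of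
-- # unit vectors; a turn is index arithmetic mod 4 on that ring, and snake growth
-- # is detected from the apple-count change instead of a membership test.
-- _RING = [('EAST', (1, 0)), ('NORTH', (0, 1)), ('WEST', (-1, 0)), ('SOUTH', (0, -1))]
-- _TURN = {'ProdolzhiPravo': 0, 'SvrtiLevo': 1, 'SvrtiDesno': -1}
--
-- def move_snake(movement, snake, apples, direction):
--     head = snake[0]
--     turn = _TURN.get(movement)
--     idx = next((i for i, (name, _) in enumerate(_RING) if name == direction), None)
--     if turn is None or idx is None:
--         new_head, new_direction = head, direction
--     else:
--         new_direction, (dx, dy) = _RING[(idx + turn) % 4]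
--         new_head = (head[0] + dx, head[1] + dy)
--     new_apples = tuple(a for a in apples if a != new_head)
--     grew = len(new_apples) != len(apples)
--     body = (new_head,) + tuple(snake[1:]) + ((snake[-1],) if grew else ())
--     return body, new_apples, new_direction
-- ===== Notes on version B (the rewrite author's own statement) =====
-- stated objective: alternative
-- what changed: The 12-branch if/elif cascade becomes rotation arithmetic: directions are indices on a counterclockwise ring of unit vectors, a turn adds 0/+1/-1 to the index mod 4, the delta is the resulting vector; snake growth is detected from the apple-count change after filtering instead of a membership test; Pre_ excludes the empty snake, on which A raises IndexError (so does B).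
import Mathlib
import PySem

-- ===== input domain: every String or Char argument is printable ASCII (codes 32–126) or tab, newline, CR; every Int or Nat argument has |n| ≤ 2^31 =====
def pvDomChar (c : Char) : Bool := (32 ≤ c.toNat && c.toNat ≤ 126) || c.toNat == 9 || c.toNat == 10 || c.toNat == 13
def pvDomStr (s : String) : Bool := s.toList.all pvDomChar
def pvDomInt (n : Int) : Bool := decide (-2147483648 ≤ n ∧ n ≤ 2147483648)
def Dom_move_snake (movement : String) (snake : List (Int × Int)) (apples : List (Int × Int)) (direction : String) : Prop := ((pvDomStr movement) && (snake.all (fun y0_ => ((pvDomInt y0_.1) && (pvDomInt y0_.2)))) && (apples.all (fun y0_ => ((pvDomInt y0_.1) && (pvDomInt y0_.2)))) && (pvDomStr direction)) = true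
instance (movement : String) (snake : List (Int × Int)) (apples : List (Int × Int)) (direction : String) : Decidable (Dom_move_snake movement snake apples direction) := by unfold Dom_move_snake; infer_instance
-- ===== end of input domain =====

-- B replaces A's 12-branch direction cascade by rotation arithmetic on a ring of unit
-- vectors and detects growth from the apple-count change (objective: alternative).
-- Equivalence is about the return value; neither program mutates its arguments.

-- ===== PORT A =====
def move_snake_head (movement : String) (snake_head : Int × Int) (direction : String) : (Int × Int) × String :=
  let x := snake_head.1
  let y := snake_head.2
  if movement = "ProdolzhiPravo" then
    if direction = "SOUTH" then ((x, y - 1), "SOUTH")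
    else if direction = "NORTH" then ((x, y + 1), "NORTH")
    else if direction = "EAST" then ((x + 1, y), "EAST")
    else if direction = "WEST" then ((x - 1, y), "WEST")
    else ((x, y), direction)
  else if movement = "SvrtiDesno" then
    if direction = "SOUTH" then ((x - 1, y), "WEST")
    else if direction = "NORTH" then ((x + 1, y), "EAST")
    else if direction = "EAST" then ((x, y - 1), "SOUTH")
    else if direction = "WEST" then ((x, y + 1), "NORTH")
    else ((x, y), direction)
  else if movement = "SvrtiLevo" then
    if direction = "SOUTH" then ((x + 1, y), "EAST")
    else if direction = "NORTH" then ((x - 1, y), "WEST")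
    else if direction = "EAST" then ((x, y + 1), "NORTH")
    else if direction = "WEST" then ((x, y - 1), "SOUTH")
    else ((x, y), direction)
  else ((x, y), direction)

def move_snake (movement : String) (snake : List (Int × Int)) (apples : List (Int × Int)) (direction : String) : (List (Int × Int)) × (List (Int × Int)) × String :=
  match PySem.List.pyGet? snake 0 with
  | none => ([], [], "")   -- snake[0]: IndexError on an empty snake; excluded by Pre_
  | some current_snake_head =>
    let r := move_snake_head movement current_snake_head direction
    let new_snake_head := r.1
    let new_direction := r.2
    let new_snake_position_list := [new_snake_head] ++ PySem.List.slice snake (some 1) none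
    let new_apple_list := apples.filter (fun apple => apple ≠ new_snake_head)
    let new_snake_position_list :=
      if new_snake_head ∈ apples then
        match PySem.List.pyGet? snake (-1) with
        | none => new_snake_position_list   -- unreachable: snake is nonempty here
        | some old_snake_tail => new_snake_position_list ++ [old_snake_tail]
      else new_snake_position_list
    (new_snake_position_list, new_apple_list, new_direction)

-- ===== PORT B =====
-- counterclockwise ring of (direction name, unit vector)
def pvRing : List (String × (Int × Int)) := [("EAST", (1, 0)), ("NORTH", (0, 1)), ("WEST", (-1, 0)), ("SOUTH", (0, -1))]
def pvTurn : PySem.Dict String Int := PySem.Dict.mk [("ProdolzhiPravo", 0), ("SvrtiLevo", 1), ("SvrtiDesno", -1)]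

def move_snake_alt (movement : String) (snake : List (Int × Int)) (apples : List (Int × Int)) (direction : String) : (List (Int × Int)) × (List (Int × Int)) × String :=
  match snake with
  | [] => ([], [], "")   -- snake[0]: IndexError; excluded by Pre_
  | head :: rest =>
    let r :=
      match pvTurn.get? movement, pvRing.findIdx? (fun p => p.1 == direction) with
      | some turn, some idx =>
        match PySem.List.pyGet? pvRing (PySem.Int.mod ((idx : Int) + turn) 4) with
        | some (name, dxy) => ((head.1 + dxy.1, head.2 + dxy.2), name)
        | none => (head, direction)   -- unreachable: the index is reduced mod 4
      | _, _ => (head, direction)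
    let new_head := r.1
    let new_apples := apples.filter (fun a => a ≠ new_head)
    let body := new_head :: rest ++ (if new_apples.length ≠ apples.length then [rest.getLastD head] else [])
    (body, new_apples, r.2)

-- ===== PRECONDITION & SPEC =====
-- Pre_ excludes the empty snake, on which A raises IndexError at snake[0] (B raises there too).
def Pre_move_snake (movement : String) (snake : List (Int × Int)) (apples : List (Int × Int)) (direction : String) : Prop := snake ≠ []
instance (movement : String) (snake : List (Int × Int)) (apples : List (Int × Int)) (direction : String) : Decidable (Pre_move_snake movement snake apples direction) := by unfold Pre_move_snake; infer_instance

def pvWitness_move_snake : String × (List (Int × Int)) × (List (Int × Int)) × String :=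
  ("ProdolzhiPravo", [(1, 1), (1, 2)], [(1, 0)], "SOUTH")

def Spec_move_snake (movement : String) (snake : List (Int × Int)) (apples : List (Int × Int)) (direction : String) (out : (List (Int × Int)) × (List (Int × Int)) × String) : Prop := out = move_snake_alt movement snake apples direction
instance (movement : String) (snake : List (Int × Int)) (apples : List (Int × Int)) (direction : String) (out : (List (Int × Int)) × (List (Int × Int)) × String) : Decidable (Spec_move_snake movement snake apples direction out) := by unfold Spec_move_snake; infer_instance

-- ===== CLAIM =====
def Claim_equal_move_snake : Prop := ∀ (movement : String) (snake : List (Int × Int)) (apples : List (Int × Int)) (direction : String), Dom_move_snake movement snake apples direction → Pre_move_snake movement snake apples direction → Spec_move_snake movement snake apples direction (move_snake movement snake apples direction)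

-- ===== LEMMAS AND PROOFS =====

-- filtering out h changes the length exactly when h occurs.
theorem filter_ne_length_iff (h : Int × Int) (l : List (Int × Int)) :
    ((l.filter (fun a => a ≠ h)).length ≠ l.length) ↔ h ∈ l := by
  rw [Ne, List.length_filter_eq_length_iff]
  simp
  constructor
  · rintro ⟨a, b, m, rfl⟩; exact m
  · intro m; exact ⟨h.1, h.2, by simpa using m, rfl⟩

-- A's 12-branch cascade computes exactly what B's ring rotation computes.
set_option maxHeartbeats 2000000 in
set_option maxRecDepth 8192 in
theorem head_eq_ring (movement direction : String) (x y : Int) :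
    move_snake_head movement (x, y) direction =
      (match pvTurn.get? movement, pvRing.findIdx? (fun p => p.1 == direction) with
       | some turn, some idx =>
         match PySem.List.pyGet? pvRing (PySem.Int.mod ((idx : Int) + turn) 4) with
         | some (name, dxy) => ((x + dxy.1, y + dxy.2), name)
         | none => ((x, y), direction)
       | _, _ => ((x, y), direction)) := by
  have e1 : ("ProdolzhiPravo" = movement) ↔ (movement = "ProdolzhiPravo") := eq_comm
  have e2 : ("SvrtiDesno" = movement) ↔ (movement = "SvrtiDesno") := eq_comm
  have e3 : ("SvrtiLevo" = movement) ↔ (movement = "SvrtiLevo") := eq_comm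
  have e4 : ("SOUTH" = direction) ↔ (direction = "SOUTH") := eq_comm
  have e5 : ("NORTH" = direction) ↔ (direction = "NORTH") := eq_comm
  have e6 : ("EAST" = direction) ↔ (direction = "EAST") := eq_comm
  have e7 : ("WEST" = direction) ↔ (direction = "WEST") := eq_comm
  by_cases hm1 : movement = "ProdolzhiPravo" <;>
  by_cases hm2 : movement = "SvrtiDesno" <;>
  by_cases hm3 : movement = "SvrtiLevo" <;>
  by_cases hd1 : direction = "SOUTH" <;>
  by_cases hd2 : direction = "NORTH" <;>
  by_cases hd3 : direction = "EAST" <;>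
  by_cases hd4 : direction = "WEST" <;>
  simp [move_snake_head, pvTurn, pvRing, PySem.Dict.get?,
    List.findIdx?_cons, List.findIdx?_nil, beq_iff_eq,
    PySem.Int.mod, PySem.List.pyGet?, PySem.List.pyIdx?,
    e1, e2, e3, e4, e5, e6, e7, hm1, hm2, hm3, hd1, hd2, hd3, hd4] <;> rfl

-- snake[-1] on a nonempty snake is its last element.
theorem pyGet_neg_one_cons (x : Int × Int) (rest : List (Int × Int)) :
    PySem.List.pyGet? (x :: rest) (-1) = some (rest.getLastD x) := by
  rw [PySem.List.pyGet?_neg_one]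
  induction rest generalizing x with
  | nil => rfl
  | cons b t ih => rw [List.getLast?_cons_cons, ih b]; cases t <;> simp [List.getLastD]

-- ===== VERDICT =====
theorem move_snake_spec : Claim_equal_move_snake := by
  intro movement snake apples direction _ hpre
  match snake with
  | [] => exact absurd rfl hpre
  | (x, y) :: rest =>
    show move_snake movement ((x, y) :: rest) apples direction = _
    simp only [move_snake, move_snake_alt, PySem.List.pyGet?_zero_cons,
      PySem.List.slice_from_one, pyGet_neg_one_cons, head_eq_ring]
    set M := (match pvTurn.get? movement, pvRing.findIdx? (fun p => p.1 == direction) with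
       | some turn, some idx =>
         match PySem.List.pyGet? pvRing (PySem.Int.mod ((idx : Int) + turn) 4) with
         | some (name, dxy) => ((x + dxy.1, y + dxy.2), name)
         | none => ((x, y), direction)
       | _, _ => ((x, y), direction)) with hM
    by_cases hmem : M.1 ∈ apples
    · have hlen := (filter_ne_length_iff M.1 apples).2 hmem
      simp only [← hM, hmem, if_true, hlen, ne_eq, not_true_eq_false, if_false,
        List.cons_append, List.nil_append, if_pos hmem]
      simp [hlen]
    · have hlen : (apples.filter (fun a => a ≠ M.1)).length = apples.length := by
        by_contra hc; exact hmem ((filter_ne_length_iff M.1 apples).1 hc)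
      simp [hmem, hlen]
      exact fun a b m e => hmem (e ▸ m)
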